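-- pv_equiv track=rewrite | github.com/nstornetta/Project-Euler | Problem 036.py | two_base_palindromes_sum
-- ===== SOURCE A (Python) =====
-- def decimal_to_binary_string(decimal_int):
--     binary_string = bin(decimal_int)
--     return binary_string[2:]
--
-- def two_base_palindromes_sum(max_number):
--     palindrome_number_sum = 0
--     for x in range(1,max_number+1):
--         string_x = str(x)
--         binary_x = decimal_to_binary_string(x)
--         if string_x == string_x[::-1] and binary_x == binary_x[::-1]:
--             palindrome_number_sum += x
--     return palindrome_number_sum
-- ===== SOURCE B (Python) =====
-- def two_base_palindromes_sum(max_number):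
--     # Only odd numbers can be palindromes in base 2 (a positive binary string
--     # starts with 1, so a palindrome must also end with 1), so scan odd numbers
--     # only and test palindromicity by arithmetic digit reversal, no strings.
--     def reverse_in_base(n, base):
--         rev = 0
--         while n > 0:
--             rev = rev * base + n % base
--             n //= base
--         return rev
--
--     total = 0
--     x = 1
--     while x <= max_number:
--         if reverse_in_base(x, 10) == x and reverse_in_base(x, 2) == x:
--             total += x
--         x += 2
--     return total
-- ===== Notes on version B (the rewrite author's own statement) =====
-- stated objective: alternative
-- what changed: B scans only the odd candidates (a positive binary palindrome must start and end with 1, so even numbers never qualify) and tests palindromicity in both bases by arithmetic digit/bit reversal instead of building strings and reversing them.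
import Mathlib
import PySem

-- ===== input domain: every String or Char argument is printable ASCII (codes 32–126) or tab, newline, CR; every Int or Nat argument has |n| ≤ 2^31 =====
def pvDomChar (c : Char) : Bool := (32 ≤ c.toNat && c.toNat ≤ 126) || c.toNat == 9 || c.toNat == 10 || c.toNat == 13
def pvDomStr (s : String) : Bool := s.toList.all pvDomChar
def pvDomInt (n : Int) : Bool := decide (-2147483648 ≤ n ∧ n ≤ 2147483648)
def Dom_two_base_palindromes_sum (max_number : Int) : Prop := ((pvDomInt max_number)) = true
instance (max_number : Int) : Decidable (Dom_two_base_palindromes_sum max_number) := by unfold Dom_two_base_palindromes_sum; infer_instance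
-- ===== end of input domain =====

-- B scans only odd candidates (even numbers are never binary palindromes) and tests
-- palindromicity by arithmetic digit/bit reversal instead of building and reversing strings.


-- ===== PORT A =====
-- bin(decimal_int)[2:]
def decimal_to_binary_string (decimal_int : Int) : String :=
  let binary_string := PySem.Int.pyBin decimal_int
  PySem.Str.slice binary_string (some 2) none

-- literal port of A: for x in range(1, max_number+1), add x when str(x) and bin(x)[2:]
-- both equal their [::-1] reversal
def two_base_palindromes_sum (max_number : Int) : Int :=
  (PySem.List.pyRange 1 (max_number + 1)).foldl
    (fun palindrome_number_sum x =>
      let string_x := PySem.Int.toStr x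
      let binary_x := decimal_to_binary_string x
      if PySem.Str.slice? string_x none none (-1) = some string_x ∧
         PySem.Str.slice? binary_x none none (-1) = some binary_x
      then palindrome_number_sum + x
      else palindrome_number_sum)
    0

-- ===== PORT B =====
-- while n > 0: rev = rev*base + n % base; n //= base
-- (structural fuel recursion only makes the loop total: fuel = n.toNat bounds the
--  iteration count, since n strictly decreases each pass; the '2 ≤ base' conjunct
--  guards divergence Python would have for base ≤ 1 — B only calls base 10 and 2)
def reverseInBaseGo (fuel : Nat) (n base rev : Int) : Int :=
  match fuel with
  | 0 => rev
  | f + 1 =>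
    if 0 < n ∧ 2 ≤ base then
      reverseInBaseGo f (PySem.Int.floordiv n base) base (rev * base + PySem.Int.mod n base)
    else rev

def reverse_in_base (n base : Int) : Int := reverseInBaseGo n.toNat n base 0

-- while x <= max_number: test x, x += 2  (fuel bounds the iteration count)
def altGo (fuel : Nat) (max_number x total : Int) : Int :=
  match fuel with
  | 0 => total
  | f + 1 =>
    if x ≤ max_number then
      altGo f max_number (x + 2)
        (if reverse_in_base x 10 = x ∧ reverse_in_base x 2 = x then total + x else total)
    else total

def two_base_palindromes_sum_alt (max_number : Int) : Int :=
  altGo max_number.toNat max_number 1 0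

-- ===== PRECONDITION & SPEC =====
def Spec_two_base_palindromes_sum (max_number : Int) (out : Int) : Prop := out = two_base_palindromes_sum_alt max_number
instance (max_number : Int) (out : Int) : Decidable (Spec_two_base_palindromes_sum max_number out) := by unfold Spec_two_base_palindromes_sum; infer_instance

-- ===== CLAIM (what is proved, stated in full; the proofs are below) =====
def Claim_equal_two_base_palindromes_sum : Prop := ∀ (max_number : Int), Dom_two_base_palindromes_sum max_number → Spec_two_base_palindromes_sum max_number (two_base_palindromes_sum max_number)

-- ===== LEMMAS AND PROOFS =====

-- A's per-element contribution
def pvF (x : Int) : Int :=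
  if PySem.Str.slice? (PySem.Int.toStr x) none none (-1) = some (PySem.Int.toStr x) ∧
     PySem.Str.slice? (decimal_to_binary_string x) none none (-1) =
       some (decimal_to_binary_string x)
  then x else 0

-- Nat.toDigits in terms of Nat.digits
theorem pvToDigitsCore_eq (b : Nat) (hb : 2 ≤ b) :
    ∀ fuel n l, n < fuel → 1 ≤ n →
      Nat.toDigitsCore b fuel n l = ((Nat.digits b n).map Nat.digitChar).reverse ++ l := by
  intro fuel
  induction fuel with
  | zero => intro n l h _; omega
  | succ f ih =>
    intro n l h h0
    have hdig := Nat.digits_def' (by omega : 1 < b) (by omega : 0 < n)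
    by_cases hq : n / b = 0
    · simp [Nat.toDigitsCore, hq, hdig]
    · have hq1 : 1 ≤ n / b := Nat.pos_of_ne_zero hq
      have hlt : n / b < f := by
        have := Nat.div_lt_self (by omega : 0 < n) (by omega : 1 < b)
        omega
      simp only [Nat.toDigitsCore, hq, if_false]
      rw [ih (n / b) _ hlt hq1, hdig]
      simp

theorem pvToDigits_eq (b n : Nat) (hb : 2 ≤ b) (hn : 1 ≤ n) :
    Nat.toDigits b n = ((Nat.digits b n).map Nat.digitChar).reverse := by
  rw [Nat.toDigits, pvToDigitsCore_eq b hb (n + 1) n [] (by omega) hn, List.append_nil]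

-- palindrome transfers through digitChar (digits < 16)
theorem pvMapPal (l : List Nat) (h : ∀ d ∈ l, d < 16) :
    ((l.map Nat.digitChar).reverse = l.map Nat.digitChar) ↔ l.reverse = l := by
  constructor
  · intro he
    rw [← List.map_reverse] at he
    apply List.ext_getElem (by simp)
    intro i h1 h2
    have hg := congrArg (fun t => t[i]?) he
    simp only [List.getElem?_map] at hg
    rw [List.getElem?_eq_getElem h1, List.getElem?_eq_getElem h2] at hg
    simp only [Option.map_some, Option.some.injEq] at hg
    have b1 : l.reverse[i] < 16 := h _ (List.mem_reverse.mp (List.getElem_mem h1))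
    have b2 : l[i] < 16 := h _ (List.getElem_mem h2)
    revert hg
    have hinj : ∀ a < 16, ∀ c < 16, Nat.digitChar a = Nat.digitChar c → a = c := by decide
    exact hinj _ b1 _ b2
  · intro he; rw [← List.map_reverse, he]

-- ofDigits is injective on fixed-length lists of digits
theorem pvOfDigitsInj (b : Nat) (hb : 2 ≤ b) :
    ∀ l1 l2 : List Nat, l1.length = l2.length → (∀ d ∈ l1, d < b) → (∀ d ∈ l2, d < b) →
      Nat.ofDigits b l1 = Nat.ofDigits b l2 → l1 = l2 := by
  intro l1
  induction l1 with
  | nil => intro l2 hl _ _ _; cases l2 <;> simp_all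
  | cons x xs ih =>
    intro l2 hl hb1 hb2 he
    cases l2 with
    | nil => simp at hl
    | cons y ys =>
      simp only [Nat.ofDigits_cons] at he
      have hx : x < b := hb1 x (by simp)
      have hy : y < b := hb2 y (by simp)
      have hxy : x = y := by
        have h1 := congrArg (· % b) he
        simpa [Nat.add_mul_mod_self_left, Nat.mod_eq_of_lt hx, Nat.mod_eq_of_lt hy] using h1
      subst hxy
      have htl : Nat.ofDigits b xs = Nat.ofDigits b ys := by
        have : b * Nat.ofDigits b xs = b * Nat.ofDigits b ys := by omega
        exact Nat.eq_of_mul_eq_mul_left (by omega) this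
      have := ih ys (by simpa using hl) (fun d hd => hb1 d (by simp [hd]))
        (fun d hd => hb2 d (by simp [hd])) htl
      simp [this]

theorem pvRevEqIff (b n : Nat) (hb : 2 ≤ b) :
    (Nat.ofDigits b (Nat.digits b n).reverse = n) ↔ (Nat.digits b n).reverse = Nat.digits b n := by
  constructor
  · intro he
    apply pvOfDigitsInj b hb _ _ (by simp)
      (fun d hd => Nat.digits_lt_base (by omega) (by simpa using hd))
      (fun d hd => Nat.digits_lt_base (by omega) hd)
    rw [he, Nat.ofDigits_digits]
  · intro he; rw [he, Nat.ofDigits_digits]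

-- the arithmetic reversal loop computes ofDigits of the reversed digit list
theorem pvRevGoEq (b : Nat) (hb : 2 ≤ b) :
    ∀ (fuel n : Nat), n ≤ fuel → ∀ (rev : Int),
      reverseInBaseGo fuel (n : Int) (b : Int) rev =
        rev * (b : Int) ^ (Nat.digits b n).length +
          ((Nat.ofDigits b (Nat.digits b n).reverse : Nat) : Int) := by
  intro fuel
  induction fuel with
  | zero =>
    intro n hn rev
    have : n = 0 := by omega
    subst this
    rw [reverseInBaseGo]
    norm_num
  | succ f ih =>
    intro n hn rev
    rcases Nat.eq_zero_or_pos n with h0 | h0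
    · subst h0
      rw [reverseInBaseGo, if_neg (by simp)]
      norm_num
    · rw [reverseInBaseGo]
      rw [if_pos ⟨by exact_mod_cast h0, by exact_mod_cast hb⟩]
      rw [PySem.Int.floordiv_natCast, PySem.Int.mod_natCast]
      rw [ih (n / b) (by
        have := Nat.div_lt_self h0 (by omega : 1 < b)
        omega)]
      rw [Nat.digits_def' (by omega : 1 < b) h0]
      rw [List.reverse_cons, Nat.ofDigits_append]
      simp only [List.length_cons, Nat.ofDigits_cons, Nat.ofDigits_nil, List.length_reverse]
      push_cast
      ring

theorem pvReverseInBase (b : Nat) (hb : 2 ≤ b) (n : Nat) :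
    reverse_in_base (n : Int) (b : Int) = ((Nat.ofDigits b (Nat.digits b n).reverse : Nat) : Int) := by
  rw [reverse_in_base, Int.toNat_natCast, pvRevGoEq b hb n n le_rfl 0, zero_mul, zero_add]

-- string palindrome test unwrapped to a List Char fact
theorem pvStrPal (s : String) :
    (PySem.Str.slice? s none none (-1) = some s) ↔ s.toList.reverse = s.toList := by
  rw [PySem.Str.slice?_none_none_neg_one, Option.some.injEq]
  constructor
  · intro h
    simpa using congrArg String.toList h
  · intro h; rw [h, String.ofList_toList]

-- str(x) for x ≥ 1
theorem pvToStrToList (x : Int) (hx : 1 ≤ x) :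
    (PySem.Int.toStr x).toList = Nat.toDigits 10 x.toNat := by
  rw [PySem.Int.toList_toStr, PySem.Int.toChars, if_neg (by omega)]

-- bin(x)[2:] for x ≥ 1
theorem pvBinToList (x : Int) (hx : 1 ≤ x) :
    (decimal_to_binary_string x).toList = Nat.toDigits 2 x.toNat := by
  show (PySem.Str.slice (PySem.Int.pyBin x) (some 2) none).toList = _
  rw [PySem.Str.slice, String.toList_ofList, PySem.Chars.slice_eq_listSlice]
  rw [PySem.List.slice_from ((PySem.Int.pyBin x).toList) (by omega : (0:Int) ≤ 2)]
  rw [PySem.Int.toList_pyBin, PySem.Int.toBinChars0b, if_neg (by omega)]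
  rfl

-- digit-level palindromicity ↔ arithmetic reversal fixed point, through chars
theorem pvPalBridge (b m : Nat) (hb : 2 ≤ b) (hb16 : b ≤ 16) (hm : 1 ≤ m) :
    ((Nat.toDigits b m).reverse = Nat.toDigits b m) ↔
      (Nat.ofDigits b (Nat.digits b m).reverse = m) := by
  rw [pvToDigits_eq b m hb hm, List.reverse_reverse, pvRevEqIff b m hb]
  constructor
  · intro h
    exact (pvMapPal (Nat.digits b m)
      (fun d hd => lt_of_lt_of_le (Nat.digits_lt_base (by omega) hd) hb16)).mp h.symm
  · intro h; rw [← List.map_reverse, h]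

-- A's test and B's test agree on every x ≥ 1
theorem pvCondBridge (x : Int) (hx : 1 ≤ x) :
    (PySem.Str.slice? (PySem.Int.toStr x) none none (-1) = some (PySem.Int.toStr x) ∧
     PySem.Str.slice? (decimal_to_binary_string x) none none (-1) =
       some (decimal_to_binary_string x)) ↔
      (reverse_in_base x 10 = x ∧ reverse_in_base x 2 = x) := by
  obtain ⟨m, rfl⟩ : ∃ m : Nat, x = (m : Int) := ⟨x.toNat, by omega⟩
  have hm : 1 ≤ m := by exact_mod_cast hx
  rw [pvStrPal, pvStrPal, pvToStrToList _ hx, pvBinToList _ hx]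
  simp only [Int.toNat_natCast]
  rw [pvPalBridge 10 m (by omega) (by omega) hm,
    pvPalBridge 2 m (by omega) (by omega) hm]
  have h10 := pvReverseInBase 10 (by omega) m
  have h2 := pvReverseInBase 2 (by omega) m
  simp only [Nat.cast_ofNat] at h10 h2
  rw [h10, h2]
  constructor
  · intro ⟨ha, hb⟩; exact ⟨by exact_mod_cast ha, by exact_mod_cast hb⟩
  · intro ⟨ha, hb⟩; exact ⟨by exact_mod_cast ha, by exact_mod_cast hb⟩

-- even numbers ≥ 2 are never binary palindromes, so A contributes 0 there
theorem pvEvenZero (x : Int) (hx : 2 ≤ x) (hev : x % 2 = 0) : pvF x = 0 := by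
  rw [pvF, if_neg]
  intro ⟨_, h2⟩
  rw [pvStrPal, pvBinToList x (by omega),
    pvToDigits_eq 2 x.toNat (by omega) (by omega),
    List.reverse_reverse] at h2
  have hpal := (pvMapPal (Nat.digits 2 x.toNat)
    (fun d hd => lt_of_lt_of_le (Nat.digits_lt_base (by omega) hd) (by omega))).mp h2.symm
  have hne : x.toNat ≠ 0 := by omega
  have hlast := Nat.getLast_digit_ne_zero 2 hne
  have hd := Nat.digits_def' (by norm_num : 1 < 2) (show 0 < x.toNat by omega)
  have hmod : x.toNat % 2 = 0 := by omega
  have hnil : Nat.digits 2 x.toNat ≠ [] := Nat.digits_ne_nil_iff_ne_zero.mpr hne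
  have hrevnil : (Nat.digits 2 x.toNat).reverse ≠ [] := by simpa using hnil
  have hhead : (Nat.digits 2 x.toNat).head hnil = 0 := by
    simp [hd, hmod]
  have hhr := List.head_reverse hrevnil
  rw [← hhr] at hlast
  have hhh : (Nat.digits 2 x.toNat).reverse.head hrevnil = (Nat.digits 2 x.toNat).head hnil := by
    congr 1
  rw [hhh, hhead] at hlast
  exact hlast rfl

-- the loop of B accumulates exactly A's contributions over [x, max]
theorem pvAltGoEq (max_number : Int) :
    ∀ (fuel : Nat) (x total : Int), 1 ≤ x → x % 2 = 1 → (max_number + 1 - x).toNat ≤ fuel →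
      altGo fuel max_number x total =
        total + ((PySem.List.pyRange x (max_number + 1)).map pvF).sum := by
  intro fuel
  induction fuel with
  | zero =>
    intro x total hx hodd hN
    rw [altGo,
      show PySem.List.pyRange x (max_number + 1) = [] from
        PySem.List.pyRange_one_eq_nil (by omega)]
    simp
  | succ f ih =>
    intro x total hx hodd hN
    rw [altGo]
    by_cases hle : x ≤ max_number
    · rw [if_pos hle]
      have hfx : (if reverse_in_base x 10 = x ∧ reverse_in_base x 2 = x then total + x
          else total) = total + pvF x := by
        rw [pvF]
        by_cases hc : reverse_in_base x 10 = x ∧ reverse_in_base x 2 = x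
        · rw [if_pos hc, if_pos ((pvCondBridge x hx).mpr hc)]
        · rw [if_neg hc, if_neg (fun hh => hc ((pvCondBridge x hx).mp hh)), add_zero]
      rw [hfx]
      rw [ih (x + 2) _ (by omega) (by omega) (by omega)]
      rw [PySem.List.pyRange_one_cons (by omega : x < max_number + 1)]
      by_cases hle2 : x + 1 ≤ max_number
      · rw [PySem.List.pyRange_one_cons (by omega : x + 1 < max_number + 1)]
        have h12 : x + 1 + 1 = x + 2 := by ring
        rw [h12]
        have hz : pvF (x + 1) = 0 := pvEvenZero (x + 1) (by omega) (by omega)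
        simp only [List.map_cons, List.sum_cons, hz]
        ring
      · rw [show PySem.List.pyRange (x + 1) (max_number + 1) = [] from
          PySem.List.pyRange_one_eq_nil (by omega),
          show PySem.List.pyRange (x + 2) (max_number + 1) = [] from
          PySem.List.pyRange_one_eq_nil (by omega)]
        simp only [List.map_cons, List.map_nil, List.sum_cons, List.sum_nil]
        ring
    · rw [if_neg hle,
        show PySem.List.pyRange x (max_number + 1) = [] from
          PySem.List.pyRange_one_eq_nil (by omega)]
      simp

-- ===== VERDICT (by name: the statement is the Claim_ definition above) =====
theorem two_base_palindromes_sum_spec : Claim_equal_two_base_palindromes_sum := by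
  intro max_number _
  unfold Spec_two_base_palindromes_sum two_base_palindromes_sum two_base_palindromes_sum_alt
  have hstep :
      (fun (palindrome_number_sum x : Int) =>
        let string_x := PySem.Int.toStr x
        let binary_x := decimal_to_binary_string x
        if PySem.Str.slice? string_x none none (-1) = some string_x ∧
           PySem.Str.slice? binary_x none none (-1) = some binary_x
        then palindrome_number_sum + x
        else palindrome_number_sum) =
      (fun acc x => acc + pvF x) := by
    funext acc x
    simp only [pvF]
    split <;> simp
  rw [hstep, PySem.List.foldl_add,
    pvAltGoEq max_number max_number.toNat 1 0 (by omega) (by decide) (by omega)]
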